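-- pv_equiv track=rewrite | github.com/bnomis/aoc-2024 | src/aoc/days/day22/run.py | process
-- ===== SOURCE A (Python) =====
-- import operator
--
-- def process(start: int, steps: int) -> int:
--     current = start
--     for _ in range(steps):
--         output = current * 64
--         output = operator.xor(current, output)
--         output1 = output % 16777216
--
--         output = int(output1 / 32)
--         output = operator.xor(output1, output)
--         output2 = output % 16777216
--
--         output = output2 * 2048
--         output = operator.xor(output2, output)
--         output3 = output % 16777216
--         current = output3
--     return current
-- ===== SOURCE B (Python) =====
-- MASK = 16777215  # 2**24 - 1
--
--
-- def _step_columns():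
--     # column i = image of the basis vector 2**i under one PRNG step
--     # (the step is GF(2)-linear on 24-bit states)
--     cols = []
--     for i in range(24):
--         v = 1 << i
--         v = (v ^ (v << 6)) & MASK
--         v = v ^ (v >> 5)
--         v = (v ^ (v << 11)) & MASK
--         cols.append(v)
--     return cols
--
--
-- def _apply(cols, v):
--     # matrix (given by its columns) times bit-vector v over GF(2)
--     if not v:
--         return 0
--     r = _apply(cols[1:], v >> 1)
--     if v & 1:
--         r ^= cols[0]
--     return r
--
--
-- def process(start: int, steps: int) -> int:
--     if steps <= 0:
--         return start
--     cols = _step_columns()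
--     v = start % 16777216
--     n = steps
--     while n:
--         if n & 1:
--             v = _apply(cols, v)
--         cols = [_apply(cols, c) for c in cols]
--         n >>= 1
--     return v
-- ===== Notes on version B (the rewrite author's own statement) =====
-- stated objective: faster
-- what changed: B treats one PRNG step as a GF(2)-linear map on 24-bit states (represented by its 24 column masks) and computes the steps-th iterate by binary exponentiation of that matrix, instead of running the loop steps times.
import Mathlib
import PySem

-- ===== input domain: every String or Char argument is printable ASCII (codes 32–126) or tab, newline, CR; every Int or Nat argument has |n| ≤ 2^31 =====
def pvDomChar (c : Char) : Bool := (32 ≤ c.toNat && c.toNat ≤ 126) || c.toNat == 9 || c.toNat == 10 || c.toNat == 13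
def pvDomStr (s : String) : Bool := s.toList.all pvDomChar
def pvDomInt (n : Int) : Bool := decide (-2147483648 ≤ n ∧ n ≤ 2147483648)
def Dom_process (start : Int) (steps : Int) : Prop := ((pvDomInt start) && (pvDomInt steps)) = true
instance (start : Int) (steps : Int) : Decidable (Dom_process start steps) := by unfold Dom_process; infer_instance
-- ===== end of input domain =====

-- B replaces A's step-by-step loop by binary exponentiation of the step's GF(2) matrix
-- (24 column masks), so the number of loop iterations is logarithmic in steps.

-- ===== PORT A =====
-- one iteration of A's loop body; 'int(output1 / 32)' is PySem.Int.truncdiv (exact here: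
-- both operands have absolute value < 2^53)
def processStep (current : Int) : Int :=
  let output := current * 64
  let output := PySem.Int.bxor current output
  let output1 := PySem.Int.mod output 16777216
  let output := PySem.Int.truncdiv output1 32
  let output := PySem.Int.bxor output1 output
  let output2 := PySem.Int.mod output 16777216
  let output := output2 * 2048
  let output := PySem.Int.bxor output2 output
  let output3 := PySem.Int.mod output 16777216
  output3

def process (start : Int) (steps : Int) : Int :=
  (PySem.List.pyRange 0 steps 1).foldl (fun current _ => processStep current) start

-- ===== PORT B =====
-- _step_columns' loop body: column i = image of the basis vector 1 <<< i under one step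
def altCol (i : Nat) : Nat :=
  let v := 1 <<< i
  let v := (v ^^^ (v <<< 6)) &&& 16777215
  let v := v ^^^ (v >>> 5)
  let v := (v ^^^ (v <<< 11)) &&& 16777215
  v

def altCols : List Nat := (List.range 24).map altCol

-- _apply: 'cols[1:]' is cols.drop 1; 'cols[0]' is cols.headD 0 (only read while in range)
def altApply (cols : List Nat) (v : Nat) : Nat :=
  if v = 0 then 0
  else
    let r := altApply (cols.drop 1) (v >>> 1)
    if v &&& 1 = 1 then r ^^^ cols.headD 0 else r
termination_by v
decreasing_by rw [Nat.shiftRight_one]; omega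

-- the 'while n' loop of process (state: cols, v, n)
def altLoop (cols : List Nat) (v : Nat) (n : Nat) : Nat :=
  if n = 0 then v
  else altLoop (cols.map (altApply cols)) (if n &&& 1 = 1 then altApply cols v else v) (n >>> 1)
termination_by n
decreasing_by rw [Nat.shiftRight_one]; omega

def process_alt (start : Int) (steps : Int) : Int :=
  if steps ≤ 0 then start
  else ((altLoop altCols (PySem.Int.mod start 16777216).toNat steps.toNat : Nat) : Int)

-- ===== PRECONDITION & SPEC =====
def Spec_process (start : Int) (steps : Int) (out : Int) : Prop := out = process_alt start steps
instance (start : Int) (steps : Int) (out : Int) : Decidable (Spec_process start steps out) := by unfold Spec_process; infer_instance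

-- ===== CLAIM (what is proved, stated in full; the proofs are below) =====
def Claim_equal_process : Prop := ∀ (start : Int) (steps : Int), Dom_process start steps → Spec_process start steps (process start steps)

-- ===== LEMMAS AND PROOFS =====

-- the PRNG step as a pure function on 24-bit Nat states, split into its three substeps
def prngSub1 (v : Nat) : Nat := (v ^^^ (v <<< 6)) &&& 16777215
def prngSub2 (v : Nat) : Nat := v ^^^ (v >>> 5)
def prngSub3 (v : Nat) : Nat := (v ^^^ (v <<< 11)) &&& 16777215
def prngStep (v : Nat) : Nat := prngSub3 (prngSub2 (prngSub1 v))

lemma altCol_eq (i : Nat) : altCol i = prngStep (1 <<< i) := rfl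

lemma altCols_eq : altCols = (List.range 24).map (fun i => prngStep (1 <<< i)) :=
  List.map_congr_left (fun i _ => altCol_eq i)

-- xor shuffling helper
lemma xor4 (a b c d : Nat) : (a ^^^ b) ^^^ (c ^^^ d) = (a ^^^ c) ^^^ (b ^^^ d) := by
  apply Nat.eq_of_testBit_eq
  intro i
  simp only [Nat.testBit_xor]
  cases a.testBit i <;> cases b.testBit i <;> cases c.testBit i <;> cases d.testBit i <;> rfl

lemma prngSub1_xor (a b : Nat) : prngSub1 (a ^^^ b) = prngSub1 a ^^^ prngSub1 b := by
  unfold prngSub1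
  rw [Nat.shiftLeft_xor_distrib, xor4, Nat.and_xor_distrib_right]

lemma prngSub2_xor (a b : Nat) : prngSub2 (a ^^^ b) = prngSub2 a ^^^ prngSub2 b := by
  unfold prngSub2
  rw [Nat.shiftRight_xor_distrib, xor4]

lemma prngSub3_xor (a b : Nat) : prngSub3 (a ^^^ b) = prngSub3 a ^^^ prngSub3 b := by
  unfold prngSub3
  rw [Nat.shiftLeft_xor_distrib, xor4, Nat.and_xor_distrib_right]

lemma prngStep_xor (a b : Nat) : prngStep (a ^^^ b) = prngStep a ^^^ prngStep b := by
  unfold prngStep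
  rw [prngSub1_xor, prngSub2_xor, prngSub3_xor]

lemma prngSub1_lt (v : Nat) : prngSub1 v < 16777216 := by
  unfold prngSub1
  have h : (v ^^^ v <<< 6) &&& 16777215 ≤ 16777215 := Nat.and_le_right
  omega

lemma prngStep_lt (v : Nat) : prngStep v < 16777216 := by
  unfold prngStep prngSub3
  have h : (prngSub2 (prngSub1 v) ^^^ prngSub2 (prngSub1 v) <<< 11) &&& 16777215 ≤ 16777215 :=
    Nat.and_le_right
  omega

-- 2*a ^^^ 1 = 2*a + 1 (disjoint bits)
lemma two_mul_xor_one (a : Nat) : 2 * a ^^^ 1 = 2 * a + 1 := by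
  apply Nat.eq_of_testBit_eq
  intro i
  rw [Nat.testBit_xor]
  cases i with
  | zero =>
    rw [Nat.testBit_zero, Nat.testBit_zero, Nat.testBit_zero]
    have e1 : 2 * a % 2 = 0 := by omega
    have e2 : (2 * a + 1) % 2 = 1 := by omega
    rw [e1, e2]
    simp
  | succ i =>
    rw [Nat.testBit_add_one, Nat.testBit_add_one, Nat.testBit_add_one]
    have e1 : 2 * a / 2 = a := by omega
    have e2 : (1 : Nat) / 2 = 0 := by omega
    have e3 : (2 * a + 1) / 2 = a := by omega
    rw [e1, e2, e3]
    simp [Nat.zero_testBit]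

lemma altApply_unfold (cols : List Nat) (v : Nat) (hv : v ≠ 0) :
    altApply cols v = if v &&& 1 = 1 then altApply (cols.drop 1) (v >>> 1) ^^^ cols.headD 0
      else altApply (cols.drop 1) (v >>> 1) := by
  rw [altApply, if_neg hv]

-- matrix-vector product: altApply on the column list of a linear map computes the map
lemma altApply_linear : ∀ (k : Nat) (f : Nat → Nat),
    (∀ a b, f (a ^^^ b) = f a ^^^ f b) → ∀ v, v < 2 ^ k →
    altApply ((List.range k).map (fun i => f (1 <<< i))) v = f v := by
  intro k
  induction k with
  | zero =>
    intro f hf v hv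
    have hf0 : f 0 = 0 := by
      have h := hf 0 0
      simpa using h
    have hv0 : v = 0 := by omega
    subst hv0
    rw [altApply]
    simp [hf0]
  | succ k ih =>
    intro f hf v hv
    have hf0 : f 0 = 0 := by
      have h := hf 0 0
      simpa using h
    by_cases hv0 : v = 0
    · subst hv0
      rw [altApply]
      simp [hf0]
    · rw [altApply_unfold _ _ hv0]
      have hrange : (List.range (k + 1)).map (fun i => f (1 <<< i)) =
          f 1 :: (List.range k).map (fun i => f (1 <<< (i + 1))) := by
        rw [List.range_succ_eq_map]
        simp [List.map_map, Function.comp_def]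
      have hdrop : ((List.range (k + 1)).map (fun i => f (1 <<< i))).drop 1 =
          (List.range k).map (fun i => (fun x => f (2 * x)) (1 <<< i)) := by
        rw [hrange]
        simp only [List.drop_succ_cons, List.drop_zero]
        apply List.map_congr_left
        intro i _
        have h : 1 <<< (i + 1) = 2 * (1 <<< i) := by
          rw [Nat.shiftLeft_eq, Nat.shiftLeft_eq, pow_succ]
          ring
        rw [h]
      have hhead : ((List.range (k + 1)).map (fun i => f (1 <<< i))).headD 0 = f 1 := by
        rw [hrange]
        rfl
      have hlin' : ∀ a b, (fun x => f (2 * x)) (a ^^^ b) =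
          (fun x => f (2 * x)) a ^^^ (fun x => f (2 * x)) b := by
        intro a b
        simp only []
        have e : ∀ x : Nat, 2 * x = x <<< 1 := by
          intro x
          rw [Nat.shiftLeft_eq, pow_one]
          ring
        rw [e (a ^^^ b), Nat.shiftLeft_xor_distrib, ← e a, ← e b, hf]
      have hv2 : v >>> 1 < 2 ^ k := by
        rw [Nat.shiftRight_one]
        have h : 2 ^ (k + 1) = 2 * 2 ^ k := by ring
        omega
      rw [hdrop, hhead, ih (fun x => f (2 * x)) hlin' (v >>> 1) hv2]
      show (if v &&& 1 = 1 then f (2 * (v >>> 1)) ^^^ f 1 else f (2 * (v >>> 1))) = f v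
      rw [Nat.and_one_is_mod, Nat.shiftRight_one]
      by_cases hodd : v % 2 = 1
      · rw [if_pos hodd, ← hf, two_mul_xor_one]
        have h : 2 * (v / 2) + 1 = v := by omega
        rw [h]
      · rw [if_neg hodd]
        have h : 2 * (v / 2) = v := by omega
        rw [h]

lemma iterate_two (f : Nat → Nat) : f^[2] = f ∘ f := by
  funext x
  simp [Function.iterate_succ_apply]

-- the squaring loop computes the n-th iterate of the represented map
lemma altLoop_eq : ∀ (n : Nat) (f : Nat → Nat),
    (∀ a b, f (a ^^^ b) = f a ^^^ f b) → (∀ v, f v < 16777216) → ∀ v, v < 16777216 →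
    altLoop ((List.range 24).map (fun i => f (1 <<< i))) v n = f^[n] v := by
  intro n
  induction n using Nat.strong_induction_on with
  | _ n ih =>
    intro f hlin hbd v hv
    rw [altLoop]
    by_cases hn : n = 0
    · simp [hn]
    · rw [if_neg hn]
      have happ : ∀ w, w < 16777216 →
          altApply ((List.range 24).map (fun i => f (1 <<< i))) w = f w := by
        intro w hw
        exact altApply_linear 24 f hlin w (by omega)
      have hcols : ((List.range 24).map (fun i => f (1 <<< i))).map
            (altApply ((List.range 24).map (fun i => f (1 <<< i)))) =
          (List.range 24).map (fun i => (f ∘ f) (1 <<< i)) := by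
        rw [List.map_map]
        apply List.map_congr_left
        intro i _
        simp only [Function.comp_def]
        rw [happ _ (hbd _)]
      have hlin2 : ∀ a b, (f ∘ f) (a ^^^ b) = (f ∘ f) a ^^^ (f ∘ f) b := by
        intro a b
        simp [hlin]
      have hbd2 : ∀ w, (f ∘ f) w < 16777216 := fun w => hbd _
      have hv' : (if n &&& 1 = 1 then altApply ((List.range 24).map (fun i => f (1 <<< i))) v else v) =
          (if n % 2 = 1 then f v else v) := by
        rw [Nat.and_one_is_mod]
        by_cases h : n % 2 = 1 <;> simp [h, happ v hv]
      have hvlt : (if n % 2 = 1 then f v else v) < 16777216 := by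
        by_cases h : n % 2 = 1 <;> simp [h, hbd, hv]
      have hlt : n >>> 1 < n := by
        rw [Nat.shiftRight_one]
        omega
      rw [hv', hcols, ih (n >>> 1) hlt (f ∘ f) hlin2 hbd2 _ hvlt]
      rw [Nat.shiftRight_one]
      have hiter : (f ∘ f)^[n / 2] = f^[2 * (n / 2)] := by
        rw [Function.iterate_mul, iterate_two]
      rw [hiter]
      by_cases hodd : n % 2 = 1
      · rw [if_pos hodd, ← Function.iterate_succ_apply]
        have h : Nat.succ (2 * (n / 2)) = n := by omega
        rw [h]
      · rw [if_neg hodd]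
        have h : 2 * (n / 2) = n := by omega
        rw [h]

-- ---- relating A's Int loop body to prngStep ----

lemma xor_mod24 (x y : Nat) : (x ^^^ y) % 16777216 = (x % 16777216) ^^^ (y % 16777216) := by
  rw [show (16777216 : Nat) = 2 ^ 24 from by norm_num, Nat.xor_mod_two_pow]

lemma and_mask (x : Nat) : x &&& 16777215 = x % 16777216 := by
  rw [show (16777215 : Nat) = 2 ^ 24 - 1 from by norm_num,
    show (16777216 : Nat) = 2 ^ 24 from by norm_num, Nat.and_two_pow_sub_one_eq_mod]

-- complement within k bits: (2^k - 1) - t = (2^k - 1) ^^^ t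
lemma compl_sub (k t : Nat) (h : t < 2 ^ k) : (2 ^ k - 1) - t = (2 ^ k - 1) ^^^ t := by
  apply Nat.eq_of_testBit_eq
  intro i
  have e : 2 ^ k - 1 - t = 2 ^ k - (t + 1) := by omega
  rw [e, Nat.testBit_two_pow_sub_succ h, Nat.testBit_xor, Nat.testBit_two_pow_sub_one]
  by_cases hi : i < k
  · simp [hi]
  · have hb : t.testBit i = false := Nat.testBit_lt_two_pow (by
      calc t < 2 ^ k := h
        _ ≤ 2 ^ i := Nat.pow_le_pow_right (by norm_num) (by omega))
    simp [hi, hb]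

lemma compl24 (t : Nat) (h : t < 16777216) : 16777215 - t = 16777215 ^^^ t := by
  have h' : t < 2 ^ 24 := by omega
  have hc := compl_sub 24 t h'
  norm_num at hc
  exact hc

lemma compl18 (t : Nat) (h : t < 262144) : 262143 - t = 262143 ^^^ t := by
  have h' : t < 2 ^ 18 := by omega
  have hc := compl_sub 18 t h'
  norm_num at hc
  exact hc

-- 64*u + 63 = (u <<< 6) ^^^ 63 (disjoint bits)
lemma shl6_add63 (u : Nat) : 64 * u + 63 = (u <<< 6) ^^^ 63 := by
  apply Nat.eq_of_testBit_eq
  intro i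
  have e : 64 * u + 63 = 2 ^ 6 * u + 63 := by ring
  rw [e, Nat.testBit_two_pow_mul_add u (by norm_num) i, Nat.testBit_xor, Nat.testBit_shiftLeft]
  rw [show (63 : Nat) = 2 ^ 6 - 1 from by norm_num, Nat.testBit_two_pow_sub_one]
  by_cases hi : i < 6
  · simp [hi, Nat.not_le.mpr hi]
  · simp [hi, Nat.not_lt.mp hi]

-- first substep on a nonnegative input
lemma sub1_of_mod (m : Nat) : (m ^^^ m * 64) % 16777216 = prngSub1 (m % 16777216) := by
  unfold prngSub1
  rw [and_mask, xor_mod24 m (m * 64), xor_mod24 (m % 16777216) ((m % 16777216) <<< 6)]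
  have h1 : m % 16777216 % 16777216 = m % 16777216 := by omega
  have h2 : (m % 16777216) <<< 6 % 16777216 = m * 64 % 16777216 := by
    rw [Nat.shiftLeft_eq, show (2 : Nat) ^ 6 = 64 from by norm_num]
    omega
  rw [h1, h2]

-- first substep on a negative input -(m+1): its xor value has the same low 24 bits as
-- prngSub1 of the 24-bit complement of m
lemma sub1_neg (m : Nat) : (m ^^^ (64 * m + 63)) % 16777216 = prngSub1 (16777215 - m % 16777216) := by
  unfold prngSub1
  rw [and_mask, xor_mod24 m (64 * m + 63),
    xor_mod24 (16777215 - m % 16777216) ((16777215 - m % 16777216) <<< 6)]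
  have h1 : (16777215 - m % 16777216) % 16777216 = 16777215 - m % 16777216 := by omega
  have h2 : (16777215 - m % 16777216) <<< 6 % 16777216 = 64 * (262143 - m % 16777216 % 262144) := by
    rw [Nat.shiftLeft_eq, show (2 : Nat) ^ 6 = 64 from by norm_num]
    omega
  have h3 : (64 * m + 63) % 16777216 = 64 * (m % 16777216 % 262144) + 63 := by omega
  rw [h1, h2, h3, shl6_add63 (m % 16777216 % 262144)]
  rw [compl24 (m % 16777216) (by omega), compl18 (m % 16777216 % 262144) (by omega)]
  rw [show 64 * ((262143 : Nat) ^^^ m % 16777216 % 262144) =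
      ((262143 : Nat) ^^^ m % 16777216 % 262144) <<< 6 from by rw [Nat.shiftLeft_eq]; ring]
  rw [Nat.shiftLeft_xor_distrib]
  conv_rhs => rw [show (16777215 : Nat) = (262143 <<< 6) ^^^ 63 from by decide]
  apply Nat.eq_of_testBit_eq
  intro i
  simp only [Nat.testBit_xor]
  cases (m % 16777216).testBit i <;> cases ((m % 16777216 % 262144) <<< 6).testBit i <;>
    cases (63 : Nat).testBit i <;> cases ((262143 : Nat) <<< 6).testBit i <;> rfl

-- cast bookkeeping
lemma int_lit24 : (16777216 : Int) = ((16777216 : Nat) : Int) := by norm_num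

lemma bxor_cast (a b : Nat) :
    PySem.Int.bxor ((a : Nat) : Int) ((b : Nat) : Int) = ((a ^^^ b : Nat) : Int) := rfl

lemma bxor_negSucc (a b : Nat) :
    PySem.Int.bxor (Int.negSucc a) (Int.negSucc b) = ((a ^^^ b : Nat) : Int) := by
  simp [PySem.Int.bxor]

lemma truncdiv_cast (a : Nat) :
    PySem.Int.truncdiv ((a : Nat) : Int) 32 = ((a / 32 : Nat) : Int) := rfl

lemma mod_cast24 (a : Nat) :
    PySem.Int.mod ((a : Nat) : Int) 16777216 = ((a % 16777216 : Nat) : Int) := by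
  rw [int_lit24, PySem.Int.mod_natCast]

lemma negSucc_mul64 (m : Nat) : (Int.negSucc m) * 64 = Int.negSucc (64 * m + 63) := by
  rw [Int.negSucc_eq, show Int.negSucc (64 * m + 63) = -(((64 * m + 63 : Nat) : Int) + 1) from
    Int.negSucc_eq _]
  push_cast
  ring

lemma mod_negSucc (m : Nat) :
    PySem.Int.mod (Int.negSucc m) 16777216 = ((16777215 - m % 16777216 : Nat) : Int) := by
  rw [PySem.Int.mod_eq_emod_of_pos (by norm_num), Int.negSucc_eq]
  omega

-- the shared tail of A's loop body, starting from output1 = ↑a with a < 2^24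
lemma stepA_tail (a : Nat) (ha : a < 16777216) :
    PySem.Int.mod
      (PySem.Int.bxor
        (PySem.Int.mod (PySem.Int.bxor ((a : Nat) : Int) (PySem.Int.truncdiv ((a : Nat) : Int) 32)) 16777216)
        (PySem.Int.mod (PySem.Int.bxor ((a : Nat) : Int) (PySem.Int.truncdiv ((a : Nat) : Int) 32)) 16777216 * 2048))
      16777216 = ((prngSub3 (prngSub2 a) : Nat) : Int) := by
  rw [truncdiv_cast a, bxor_cast a (a / 32), mod_cast24 (a ^^^ a / 32)]
  have hx : (a ^^^ a / 32) % 16777216 = prngSub2 a := by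
    unfold prngSub2
    rw [Nat.shiftRight_eq_div_pow, show (2 : Nat) ^ 5 = 32 from by norm_num]
    apply Nat.mod_eq_of_lt
    rw [show (16777216 : Nat) = 2 ^ 24 from by norm_num]
    exact Nat.xor_lt_two_pow (by omega) (by omega)
  rw [hx]
  rw [show ((prngSub2 a : Nat) : Int) * 2048 = ((prngSub2 a * 2048 : Nat) : Int) from by push_cast; ring]
  rw [bxor_cast (prngSub2 a) (prngSub2 a * 2048), mod_cast24 (prngSub2 a ^^^ prngSub2 a * 2048)]
  congr 1
  unfold prngSub3
  rw [and_mask, Nat.shiftLeft_eq]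

-- A's loop body equals prngStep of the reduced 24-bit state
lemma stepA_eq (v : Int) :
    processStep v = ((prngStep (PySem.Int.mod v 16777216).toNat : Nat) : Int) := by
  cases v with
  | ofNat m =>
    show processStep ((m : Nat) : Int) =
      ((prngStep (PySem.Int.mod ((m : Nat) : Int) 16777216).toNat : Nat) : Int)
    simp only [processStep]
    rw [show ((m : Nat) : Int) * 64 = ((m * 64 : Nat) : Int) from by push_cast; ring]
    rw [bxor_cast m (m * 64), mod_cast24 (m ^^^ m * 64), sub1_of_mod m]
    rw [stepA_tail _ (prngSub1_lt _)]
    rw [mod_cast24 m, Int.toNat_natCast]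
    rfl
  | negSucc m =>
    simp only [processStep]
    rw [negSucc_mul64 m, bxor_negSucc m (64 * m + 63), mod_cast24 (m ^^^ (64 * m + 63)), sub1_neg m]
    rw [stepA_tail _ (prngSub1_lt _)]
    rw [mod_negSucc m, Int.toNat_natCast]
    rfl

-- fold over range(steps) is function iteration
lemma fold_iter (g : Int → Int) : ∀ (n : Nat) (a b : Int), (b - a).toNat = n → ∀ init,
    (PySem.List.pyRange a b 1).foldl (fun c _ => g c) init = g^[n] init := by
  intro n
  induction n with
  | zero =>
    intro a b h init
    rw [PySem.List.pyRange_one_eq_nil (by omega)]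
    rfl
  | succ k ih =>
    intro a b h init
    rw [PySem.List.pyRange_one_cons (by omega)]
    simp only [List.foldl_cons]
    rw [ih (a + 1) b (by omega) (g init), ← Function.iterate_succ_apply]

-- iterating A's step from a reduced state matches prngStep iterates
lemma iter_eq : ∀ (k : Nat) (w : Nat), w < 16777216 →
    processStep^[k] ((w : Nat) : Int) = ((prngStep^[k] w : Nat) : Int) := by
  intro k
  induction k with
  | zero => intro w _; rfl
  | succ k ih =>
    intro w hw
    rw [Function.iterate_succ_apply, Function.iterate_succ_apply]
    have h1 : processStep ((w : Nat) : Int) = ((prngStep w : Nat) : Int) := by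
      rw [stepA_eq, mod_cast24 w, Int.toNat_natCast, Nat.mod_eq_of_lt hw]
    rw [h1, ih (prngStep w) (prngStep_lt w)]

-- ===== VERDICT (by name: the statement is the Claim_ definition above) =====
theorem process_spec : Claim_equal_process := by
  intro start steps _
  unfold Spec_process
  unfold process process_alt
  by_cases h : steps ≤ 0
  · rw [PySem.List.pyRange_one_eq_nil h, if_pos h]
    rfl
  · rw [if_neg h]
    have hr0 : 0 ≤ PySem.Int.mod start 16777216 := PySem.Int.mod_nonneg _ (by norm_num)
    have hr1 : PySem.Int.mod start 16777216 < 16777216 := PySem.Int.mod_lt _ (by norm_num)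
    rw [fold_iter processStep steps.toNat 0 steps (by omega) start]
    rw [altCols_eq, altLoop_eq steps.toNat prngStep prngStep_xor prngStep_lt _ (by omega)]
    obtain ⟨j, hj⟩ : ∃ j, steps.toNat = j + 1 := ⟨steps.toNat - 1, by omega⟩
    rw [hj, Function.iterate_succ_apply, Function.iterate_succ_apply, stepA_eq]
    exact iter_eq j (prngStep (PySem.Int.mod start 16777216).toNat) (prngStep_lt _)
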